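-- pv_equiv track=rewrite | github.com/KanavSabharwal/GLoRiPHY | LoRaPHY/decode.py | deinterleave
-- ===== SOURCE A (Python) =====
-- def rotl(bits, count=1, size=8):
--     len_mask = (1 << size) - 1
--     count %= size        # Limit bit rotate count to size
--     bits &= len_mask     # Limit given bits to size
--
--     return ((bits << count) & len_mask) | (bits >> (size - count))
--
-- def deinterleave(symbols, ppm, rdd):
--     bits_per_word = rdd + 4
--     codewords = []
--
--     for start_idx in range(0, len(symbols), bits_per_word):
--         block = [0] * ppm
--         for i in range(bits_per_word):
--             word = rotl(symbols[start_idx + i], i, ppm)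
--
--             j = 1 << (ppm - 1)
--             x = ppm - 1
--
--             while j:
--                 block[x] |= ((word & j) != 0) << i
--                 j >>= 1
--                 x -= 1
--         codewords.extend(block)
--     return codewords
-- ===== SOURCE B (Python) =====
-- def rotl(bits, count=1, size=8):
--     len_mask = (1 << size) - 1
--     count %= size
--     bits &= len_mask
--     return ((bits << count) & len_mask) | (bits >> (size - count))
--
-- def _column(words, x):
--     # Horner evaluation: word i contributes bit x with weight 2**i,
--     # so fold from the most significant word down.
--     acc = 0
--     for w in reversed(words):
--         acc = 2 * acc + ((w >> x) & 1)
--     return acc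
--
-- def deinterleave(symbols, ppm, rdd):
--     bits_per_word = rdd + 4
--     codewords = []
--     for start_idx in range(0, len(symbols), bits_per_word):
--         words = [rotl(symbols[start_idx + i], i, ppm) for i in range(bits_per_word)]
--         codewords.extend(_column(words, x) for x in range(ppm))
--     return codewords
-- ===== Notes on version B (the rewrite author's own statement) =====
-- stated objective: alternative
-- what changed: Replaces the mutable block array updated by a shifting bit-mask while-loop (block[x] |= bit << i) with a loop interchange: per block it first builds the rotated words, then computes each of the ppm codewords directly by a Horner fold (acc = 2*acc + bit) over the words from most-significant down, so the mask loop and the in-place array disappear.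
import Mathlib
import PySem

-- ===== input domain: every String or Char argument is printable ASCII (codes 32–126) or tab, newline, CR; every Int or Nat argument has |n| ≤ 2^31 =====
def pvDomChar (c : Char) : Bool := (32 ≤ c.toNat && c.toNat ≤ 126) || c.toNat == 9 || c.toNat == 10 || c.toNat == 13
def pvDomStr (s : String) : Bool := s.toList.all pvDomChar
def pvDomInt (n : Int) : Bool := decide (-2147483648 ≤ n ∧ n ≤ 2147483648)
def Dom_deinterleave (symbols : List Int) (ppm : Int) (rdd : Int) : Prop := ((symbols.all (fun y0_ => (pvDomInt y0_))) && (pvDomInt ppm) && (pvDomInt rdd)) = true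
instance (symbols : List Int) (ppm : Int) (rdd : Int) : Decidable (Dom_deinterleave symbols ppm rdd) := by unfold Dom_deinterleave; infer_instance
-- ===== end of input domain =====

-- B replaces A's mask/while in-place block updates by a loop interchange with a per-codeword
-- Horner fold over the rotated words (objective: alternative; same asymptotic cost).


-- ===== PORT A =====
-- shared module helper rotl(bits, count, size)
def rotl (bits : Int) (count : Int) (size : Int) : Int :=
  let lenMask : Int := ((1 : Int) <<< size.toNat) - 1
  let count' := PySem.Int.mod count size
  let bits' := PySem.Int.band bits lenMask
  PySem.Int.bor (PySem.Int.band (bits' <<< count'.toNat) lenMask) (bits' >>> (size - count').toNat)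

-- the 'while j:' loop of A (j is a nonnegative Python int, halved each turn)
def whileJ (word : Int) (i : Nat) (j : Nat) (x : Int) (block : List Int) : List Int :=
  if j = 0 then block
  else
    whileJ word i (j / 2) (x - 1)
      (PySem.List.pySetD block x
        (PySem.Int.bor (PySem.List.pyGetD block x 0)
          ((if PySem.Int.band word (j : Int) ≠ 0 then (1 : Int) else 0) <<< i)))
  decreasing_by exact Nat.div_lt_self (Nat.pos_of_ne_zero (by omega)) (by omega)

def deinterleave (symbols : List Int) (ppm : Int) (rdd : Int) : List Int :=
  let bitsPerWord := rdd + 4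
  (PySem.List.pyRange 0 (symbols.length : Int) bitsPerWord).foldl
    (fun codewords startIdx =>
      let block :=
        (PySem.List.pyRange 0 bitsPerWord 1).foldl
          (fun block i =>
            let word := rotl (PySem.List.pyGetD symbols (startIdx + i) 0) i ppm
            whileJ word i.toNat ((1 : Nat) <<< (ppm - 1).toNat) (ppm - 1) block)
          (List.replicate ppm.toNat 0)
      codewords ++ block)
    []

-- ===== PORT B =====
-- _column(words, x): Horner fold over the words, most significant word first
def column (words : List Int) (x : Int) : Int :=
  words.reverse.foldl (fun (acc w : Int) => 2 * acc + PySem.Int.band (w >>> x.toNat) 1) 0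

def deinterleave_alt (symbols : List Int) (ppm : Int) (rdd : Int) : List Int :=
  let bitsPerWord := rdd + 4
  (PySem.List.pyRange 0 (symbols.length : Int) bitsPerWord).foldl
    (fun codewords startIdx =>
      let words :=
        (PySem.List.pyRange 0 bitsPerWord 1).map
          (fun i => rotl (PySem.List.pyGetD symbols (startIdx + i) 0) i ppm)
      codewords ++ (PySem.List.pyRange 0 ppm 1).map (fun x => column words x))
    []

-- ===== PRECONDITION & SPEC =====
-- Pre_ excludes exactly the inputs where Python A raises: bits_per_word = rdd+4 = 0 (range step 0,
-- ValueError); with a nonempty symbols list and rdd+4 > 0, ppm ≤ 0 (rotl's shifts raise) or a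
-- length that is not a multiple of bits_per_word (IndexError on the trailing partial block).
def Pre_deinterleave (symbols : List Int) (ppm : Int) (rdd : Int) : Prop :=
  rdd + 4 < 0 ∨ (0 < rdd + 4 ∧ (symbols = [] ∨ (1 ≤ ppm ∧ (rdd + 4) ∣ (symbols.length : Int))))
instance (symbols : List Int) (ppm : Int) (rdd : Int) : Decidable (Pre_deinterleave symbols ppm rdd) := by unfold Pre_deinterleave; infer_instance

def pvWitness_deinterleave : List Int × Int × Int := ([1, 2, 3, 4, 5, 6, 7, 8], 4, 0)

def Spec_deinterleave (symbols : List Int) (ppm : Int) (rdd : Int) (out : List Int) : Prop := out = deinterleave_alt symbols ppm rdd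
instance (symbols : List Int) (ppm : Int) (rdd : Int) (out : List Int) : Decidable (Spec_deinterleave symbols ppm rdd out) := by unfold Spec_deinterleave; infer_instance

-- ===== CLAIM (what is proved, stated in full; the proofs are below) =====
def Claim_equal_deinterleave : Prop := ∀ (symbols : List Int) (ppm : Int) (rdd : Int), Dom_deinterleave symbols ppm rdd → Pre_deinterleave symbols ppm rdd → Spec_deinterleave symbols ppm rdd (deinterleave symbols ppm rdd)

-- ===== LEMMAS AND PROOFS =====

-- bit x of w, as B computes it
def bitAt (w : Int) (x : Nat) : Int := PySem.Int.band (w >>> x) 1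

-- Σ_i bitAt(ws[i], x) * 2^i, recursively
def colS : List Int → Nat → Int
  | [], _ => 0
  | w :: ws, x => bitAt w x + 2 * colS ws x

theorem bitAt_bounds (w : Int) (x : Nat) : 0 ≤ bitAt w x ∧ bitAt w x ≤ 1 := by
  unfold bitAt
  rw [PySem.Int.band_one]
  constructor
  · exact PySem.Int.mod_nonneg _ (by norm_num)
  · have := PySem.Int.mod_lt (w >>> x) (b := 2) (by norm_num); omega

theorem colS_bounds (ws : List Int) (x : Nat) : 0 ≤ colS ws x ∧ colS ws x < 2 ^ ws.length := by
  induction ws with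
  | nil => simp [colS]
  | cons w ws ih =>
    have hb := bitAt_bounds w x
    simp only [colS, List.length_cons, pow_succ]
    omega

theorem colS_append_singleton (ws : List Int) (w : Int) (x : Nat) :
    colS (ws ++ [w]) x = colS ws x + bitAt w x * 2 ^ ws.length := by
  induction ws with
  | nil => simp [colS]
  | cons a ws ih => simp only [List.cons_append, colS, ih, List.length_cons, pow_succ]; ring

theorem column_eq_colS (ws : List Int) (x : Int) : column ws x = colS ws x.toNat := by
  suffices h : ∀ (ws : List Int) (a : Int),
      ws.reverse.foldl (fun (acc w : Int) => 2 * acc + PySem.Int.band (w >>> x.toNat) 1) a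
        = a * 2 ^ ws.length + colS ws x.toNat by
    have := h ws 0; simpa [column] using this
  intro ws
  induction ws with
  | nil => intro a; simp [colS]
  | cons w ws ih =>
    intro a
    simp only [List.reverse_cons, List.foldl_append, List.foldl_cons, List.foldl_nil, ih,
      colS, List.length_cons, pow_succ]
    show 2 * (a * 2 ^ ws.length + colS ws x.toNat) + PySem.Int.band (w >>> x.toNat) 1
        = a * (2 ^ ws.length * 2) + (bitAt w x.toNat + 2 * colS ws x.toNat)
    unfold bitAt; ring

-- a low number or-ed with a single higher bit is addition (Nat form)
theorem nat_or_two_pow (n M : Nat) (h : n < 2 ^ M) : n ||| 2 ^ M = n + 2 ^ M := by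
  apply Nat.eq_of_testBit_eq
  intro j
  have h1 := Nat.testBit_two_pow_mul_add 1 h j
  rw [Nat.mul_one] at h1
  rw [Nat.add_comm n (2 ^ M), h1, Nat.testBit_or]
  rcases lt_trichotomy j M with hj | hj | hj
  · rw [if_pos hj, Nat.testBit_two_pow_of_ne (by omega : M ≠ j)]
    simp
  · subst hj
    rw [if_neg (by omega)]
    simp [Nat.testBit_two_pow_self, Nat.testBit_eq_false_of_lt h]
  · rw [if_neg (by omega), Nat.testBit_two_pow_of_ne (by omega : M ≠ j)]
    have h2 : (1 : Nat).testBit (j - M) = false := by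
      apply Nat.testBit_eq_false_of_lt
      calc (1 : Nat) < 2 ^ 1 := by norm_num
        _ ≤ 2 ^ (j - M) := Nat.pow_le_pow_right (by norm_num) (by omega)
    have h3 : n.testBit j = false := Nat.testBit_eq_false_of_lt (lt_of_lt_of_le h (Nat.pow_le_pow_right (by norm_num) (by omega)))
    simp [h2, h3]

-- w ≥ 0: the mask test A uses equals the shifted bit B uses
theorem mask_eq_bit (w : Int) (hw : 0 ≤ w) (x : Nat) :
    (if PySem.Int.band w ((2 ^ x : Nat) : Int) ≠ 0 then (1 : Int) else 0) = bitAt w x := by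
  obtain ⟨n, rfl⟩ := Int.eq_ofNat_of_zero_le hw
  unfold bitAt
  have h1 : ((n : Int) >>> x) = ((n >>> x : Nat) : Int) := by
    simp [Int.shiftRight_eq, Int.natCast_shiftRight]
  rw [h1]
  have h2 : PySem.Int.band ((n : Int)) ((2 ^ x : Nat) : Int) = ((n &&& 2 ^ x : Nat) : Int) :=
    PySem.Int.band_natCast _ _
  have h3 : PySem.Int.band (((n >>> x : Nat)) : Int) 1 = ((n >>> x &&& 1 : Nat) : Int) := by
    exact_mod_cast PySem.Int.band_natCast (n >>> x) 1
  rw [h2, h3]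
  have h4 : n &&& 2 ^ x = (n.testBit x).toNat * 2 ^ x := Nat.and_two_pow n x
  have h5 : n >>> x &&& 1 = (n >>> x) % 2 := Nat.and_one_is_mod _
  have h6 : n.testBit x = decide ((n >>> x) % 2 = 1) := by
    simp [Nat.testBit, Nat.and_one_is_mod]
  rw [h4, h5, h6]
  have h7 : (n >>> x) % 2 = 0 ∨ (n >>> x) % 2 = 1 := by omega
  rcases h7 with h7 | h7 <;> simp [h7]

-- or of a small number with a single (possibly zero) higher bit is addition
theorem bor_add (a b : Int) (M : Nat) (ha0 : 0 ≤ a) (ha : a < 2 ^ M) (hb0 : 0 ≤ b) (hb : b ≤ 1) :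
    PySem.Int.bor a (b <<< M) = a + b * 2 ^ M := by
  obtain ⟨n, rfl⟩ := Int.eq_ofNat_of_zero_le ha0
  interval_cases b
  · simp [Int.zero_shiftLeft]
  · have h1 : ((1 : Int) <<< M) = ((2 ^ M : Nat) : Int) := by
      rw [Int.shiftLeft_eq]; push_cast; ring
    rw [h1, PySem.Int.bor_natCast]
    have hn : n < 2 ^ M := by exact_mod_cast ha
    rw [nat_or_two_pow n M hn]
    push_cast; ring

-- rotl is nonnegative when size ≥ 1
theorem rotl_nonneg (bits count size : Int) (h : 1 ≤ size) : 0 ≤ rotl bits count size := by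
  have hmask : (0 : Int) ≤ (1 : Int) <<< size.toNat - 1 := by
    rw [Int.shiftLeft_eq]
    have : (0 : Int) < 2 ^ size.toNat := by positivity
    omega
  have hb : 0 ≤ PySem.Int.band bits ((1 : Int) <<< size.toNat - 1) := by
    rw [PySem.Int.band_comm]; exact PySem.Int.band_nonneg_of_nonneg_left _ hmask
  have h1 : 0 ≤ PySem.Int.band ((PySem.Int.band bits ((1 : Int) <<< size.toNat - 1)) <<< (PySem.Int.mod count size).toNat) ((1 : Int) <<< size.toNat - 1) := by
    rw [PySem.Int.band_comm]; exact PySem.Int.band_nonneg_of_nonneg_left _ hmask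
  have h2 : 0 ≤ (PySem.Int.band bits ((1 : Int) <<< size.toNat - 1)) >>> (size - PySem.Int.mod count size).toNat := by
    obtain ⟨nb, hnb⟩ := Int.eq_ofNat_of_zero_le hb
    rw [hnb]
    have h3 : ((nb : Int)) >>> (size - PySem.Int.mod count size).toNat
        = ((nb >>> (size - PySem.Int.mod count size).toNat : Nat) : Int) := by
      simp [Int.shiftRight_eq, Int.natCast_shiftRight]
    rw [h3]
    exact Int.natCast_nonneg _
  show 0 ≤ PySem.Int.bor (PySem.Int.band ((PySem.Int.band bits ((1 : Int) <<< size.toNat - 1)) <<< (PySem.Int.mod count size).toNat) ((1 : Int) <<< size.toNat - 1)) ((PySem.Int.band bits ((1 : Int) <<< size.toNat - 1)) >>> (size - PySem.Int.mod count size).toNat)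
  obtain ⟨m, hm⟩ := Int.eq_ofNat_of_zero_le h1
  obtain ⟨k, hk⟩ := Int.eq_ofNat_of_zero_le h2
  rw [hm, hk, PySem.Int.bor_natCast]
  exact Int.natCast_nonneg _

-- pySetD on a range-map updates the mapped function pointwise
theorem pySetD_range_map (P : Nat) (g : Nat → Int) (x : Nat) (hx : x < P) (v : Int) :
    PySem.List.pySetD ((List.range P).map g) ((x : Nat) : Int) v
      = (List.range P).map (fun y => if y = x then v else g y) := by
  have hlen : x < ((List.range P).map g).length := by simpa using hx
  have hset := PySem.List.pySet?_natCast (xs := (List.range P).map g) (n := x) (v := v) hlen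
  unfold PySem.List.pySetD
  rw [hset]
  simp only [Option.getD_some]
  apply List.ext_getElem
  · simp
  · intro i h1 h2
    simp only [List.getElem_set, List.getElem_map, List.getElem_range]
    by_cases h : i = x
    · simp [h]
    · rw [if_neg h, if_neg (fun hh : x = i => h hh.symm)]

theorem pyGetD_range_map (P : Nat) (g : Nat → Int) (x : Nat) (hx : x < P) :
    PySem.List.pyGetD ((List.range P).map g) ((x : Nat) : Int) 0 = g x := by
  rw [PySem.List.pyGetD_natCast]
  simp [List.getD, hx]

theorem pySetD_nil (x : Int) (v : Int) : PySem.List.pySetD ([] : List Int) x v = [] := by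
  unfold PySem.List.pySetD
  have h : PySem.List.pySet? ([] : List Int) x v = none := by
    rw [PySem.List.pySet?_eq_none_iff]
    simp only [PySem.Raise.InRange, List.length_nil]
    omega
  rw [h]
  rfl

theorem whileJ_nil (word : Int) (i : Nat) : ∀ (j : Nat) (x : Int), whileJ word i j x [] = [] := by
  intro j
  induction j using Nat.strong_induction_on with
  | _ j ih =>
    intro x
    rw [whileJ]
    split
    · rfl
    · rename_i hj
      rw [pySetD_nil]
      exact ih (j / 2) (Nat.div_lt_self (by omega) (by omega)) (x - 1)

theorem foldl_whileJ_nil (f : Int → Int) (J : Nat) (X : Int) :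
    ∀ (l : List Int), l.foldl (fun block i => whileJ (f i) i.toNat J X block) [] = [] := by
  intro l
  induction l with
  | nil => rfl
  | cons a l ih =>
    simp only [List.foldl_cons]
    rw [whileJ_nil]
    exact ih

-- closed form of A's while loop on a range-map block (mask j = 2^t, index x = t < P)
theorem whileJ_range_map (word : Int) (i : Nat) (P : Nat) :
    ∀ (t : Nat) (g : Nat → Int), t < P →
      whileJ word i (2 ^ t) ((t : Nat) : Int) ((List.range P).map g)
        = (List.range P).map (fun y =>
            if y ≤ t then
              PySem.Int.bor (g y) ((if PySem.Int.band word ((2 ^ y : Nat) : Int) ≠ 0 then (1 : Int) else 0) <<< i)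
            else g y) := by
  intro t
  induction t with
  | zero =>
    intro g h
    rw [whileJ, if_neg (by norm_num : ¬ (2 ^ 0 : Nat) = 0)]
    rw [show ((2 ^ 0 : Nat) / 2) = 0 by norm_num]
    rw [whileJ, if_pos rfl]
    rw [pyGetD_range_map P g 0 h, pySetD_range_map P g 0 h]
    congr 1
    funext y
    by_cases hy : y = 0
    · subst hy; simp
    · simp only [if_neg hy, if_neg (by omega : ¬ y ≤ 0)]
  | succ t ih =>
    intro g h
    rw [whileJ, if_neg (by simp : ¬ (2 ^ (t + 1) : Nat) = 0)]
    rw [show ((2 ^ (t + 1) : Nat) / 2) = 2 ^ t by rw [pow_succ]; omega]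
    rw [show ((t + 1 : Nat) : Int) - 1 = ((t : Nat) : Int) by push_cast; ring]
    rw [pyGetD_range_map P g (t + 1) h, pySetD_range_map P g (t + 1) h]
    rw [ih _ (by omega)]
    congr 1
    funext y
    by_cases h1 : y ≤ t
    · simp only [if_pos h1, if_pos (by omega : y ≤ t + 1), if_neg (by omega : ¬ y = t + 1)]
    · by_cases h2 : y = t + 1
      · subst h2
        simp [h1]
      · simp only [if_neg h1, if_neg h2, if_neg (by omega : ¬ y ≤ t + 1)]

-- A's i-fold over consecutive indices, starting from a colS-shaped block
theorem fold_block (P : Nat) (f : Int → Int) (hf : ∀ i, 0 ≤ f i) :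
    ∀ (m n : Nat) (ws : List Int), ws.length = n →
      ((List.range' n m).map (fun k => ((k : Nat) : Int))).foldl
          (fun block i => whileJ (f i) i.toNat (2 ^ (P - 1)) (((P - 1 : Nat) : Int)) block)
          ((List.range P).map (fun y => colS ws y))
        = (List.range P).map (fun y => colS (ws ++ (List.range' n m).map (fun k => f ((k : Nat) : Int))) y) := by
  intro m
  induction m with
  | zero => intro n ws _; simp
  | succ m ih =>
    intro n ws hlen
    rw [List.range'_succ]
    simp only [List.map_cons, List.foldl_cons]
    have hstep : whileJ (f ((n : Nat) : Int)) (((n : Nat) : Int)).toNat (2 ^ (P - 1)) (((P - 1 : Nat) : Int)) ((List.range P).map (fun y => colS ws y))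
        = (List.range P).map (fun y => colS (ws ++ [f ((n : Nat) : Int)]) y) := by
      rcases Nat.eq_zero_or_pos P with hP | hP
      · subst hP
        simp only [List.range_zero, List.map_nil]
        exact whileJ_nil _ _ _ _
      · rw [Int.toNat_natCast]
        rw [whileJ_range_map (f ((n : Nat) : Int)) n P (P - 1) _ (by omega)]
        apply List.map_congr_left
        intro y hy
        have hylt : y < P := List.mem_range.mp hy
        rw [if_pos (by omega : y ≤ P - 1)]
        rw [mask_eq_bit (f ((n : Nat) : Int)) (hf _) y]
        rw [bor_add (colS ws y) (bitAt (f ((n : Nat) : Int)) y) n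
          (colS_bounds ws y).1 (hlen ▸ (colS_bounds ws y).2)
          (bitAt_bounds _ y).1 (bitAt_bounds _ y).2]
        rw [colS_append_singleton ws (f ((n : Nat) : Int)) y, hlen]
    rw [hstep]
    rw [ih (n + 1) (ws ++ [f ((n : Nat) : Int)]) (by simp [hlen])]
    simp [List.append_assoc]

theorem per_block (ppm : Int) (f : Int → Int) (hf : 1 ≤ ppm → ∀ i, 0 ≤ f i) (bpw : Int) :
    (PySem.List.pyRange 0 bpw 1).foldl
        (fun block i => whileJ (f i) i.toNat ((1 : Nat) <<< (ppm - 1).toNat) (ppm - 1) block)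
        (List.replicate ppm.toNat 0)
      = (PySem.List.pyRange 0 ppm 1).map (fun x => column ((PySem.List.pyRange 0 bpw 1).map f) x) := by
  rcases le_or_gt ppm 0 with hp | hp
  · have h0 : ppm.toNat = 0 := by omega
    rw [PySem.List.pyRange_one_eq_nil hp, List.map_nil]
    simp only [h0, List.replicate_zero]
    exact foldl_whileJ_nil _ _ _ _
  · have hP1 : 1 ≤ ppm.toNat := by omega
    have e1 : (1 : Nat) <<< (ppm - 1).toNat = 2 ^ (ppm.toNat - 1) := by
      rw [Nat.shiftLeft_eq, one_mul]; congr 1; omega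
    have e2 : ppm - 1 = ((ppm.toNat - 1 : Nat) : Int) := by omega
    rw [e1, e2]
    have e3 : List.replicate ppm.toNat (0 : Int) = (List.range ppm.toNat).map (fun y => colS [] y) := by
      apply List.ext_getElem <;> simp [colS]
    rw [e3]
    have e4 : PySem.List.pyRange 0 bpw 1 = (List.range' 0 bpw.toNat).map (fun k => ((k : Nat) : Int)) := by
      rw [PySem.List.pyRange_one]
      simp [List.range_eq_range']
    rw [e4]
    rw [fold_block ppm.toNat f (hf (by omega)) bpw.toNat 0 [] rfl]
    rw [PySem.List.pyRange_one 0 ppm]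
    simp only [List.map_map, Int.sub_zero]
    apply List.map_congr_left
    intro y hy
    have hylt : y < ppm.toNat := List.mem_range.mp hy
    simp only [Function.comp_apply]
    rw [column_eq_colS]
    have e5 : ((0 : Int) + (y : Int)).toNat = y := by omega
    rw [e5]
    simp only [List.nil_append]
    rfl

theorem deinterleave_eq (symbols : List Int) (ppm : Int) (rdd : Int) :
    deinterleave symbols ppm rdd = deinterleave_alt symbols ppm rdd := by
  show (PySem.List.pyRange 0 (symbols.length : Int) (rdd + 4)).foldl
      (fun codewords startIdx =>
        codewords ++
          (PySem.List.pyRange 0 (rdd + 4) 1).foldl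
            (fun block i =>
              whileJ (rotl (PySem.List.pyGetD symbols (startIdx + i) 0) i ppm) i.toNat
                ((1 : Nat) <<< (ppm - 1).toNat) (ppm - 1) block)
            (List.replicate ppm.toNat 0)) []
    = (PySem.List.pyRange 0 (symbols.length : Int) (rdd + 4)).foldl
      (fun codewords startIdx =>
        codewords ++
          (PySem.List.pyRange 0 ppm 1).map
            (fun x => column ((PySem.List.pyRange 0 (rdd + 4) 1).map
              (fun i => rotl (PySem.List.pyGetD symbols (startIdx + i) 0) i ppm)) x)) []
  congr 1
  funext codewords startIdx
  exact congrArg (codewords ++ ·)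
    (per_block ppm (fun i => rotl (PySem.List.pyGetD symbols (startIdx + i) 0) i ppm)
      (fun hp i => rotl_nonneg _ _ _ hp) (rdd + 4))

-- ===== VERDICT (by name: the statement is the Claim_ definition above) =====
theorem deinterleave_spec : Claim_equal_deinterleave := by
  intro symbols ppm rdd _ _
  unfold Spec_deinterleave
  exact deinterleave_eq symbols ppm rdd
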